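-- pv_equiv track=rewrite | github.com/r3xd17/reconex | reconex.py | format_tech_output
-- ===== SOURCE A (Python) =====
-- from typing import List, Set, Dict, Optional, Any
--
-- def format_tech_output(tech_results: Dict[str, List[str]]) -> str:
--     """Format technology detection results in a structured way"""
--     if not tech_results:
--         return "[yellow]No technologies detected[/yellow]"
--
--     output_lines = []
--
--     for host, techs in sorted(tech_results.items()):
--         if not techs:
--             output_lines.append(f"[dim]{host} → No technologies detected[/dim]")
--             continue
--
--         categories = {
--             "🌐 Web Server": [],
--             "⚙️ Backend Framework": [],
--             "🎨 Frontend Framework": [],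
--             "📱 CMS/Platform": [],
--             "🛡️ CDN/WAF": [],
--             "📊 Analytics/Tracking": [],
--             "🔧 Development Tools": [],
--             "📦 Other Technologies": []
--         }
--
--         tech_mapping = {
--             "Nginx": "🌐 Web Server",
--             "Apache": "🌐 Web Server",
--             "LiteSpeed": "🌐 Web Server",
--             "Gunicorn": "🌐 Web Server",
--             "uWSGI": "🌐 Web Server",
--             "Tomcat": "🌐 Web Server",
--
--             "PHP": "⚙️ Backend Framework",
--             "ASP.NET": "⚙️ Backend Framework",
--             "Express": "⚙️ Backend Framework",
--             "Laravel": "⚙️ Backend Framework",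
--             "Node.js": "⚙️ Backend Framework",
--
--             "React": "🎨 Frontend Framework",
--             "Vue.js": "🎨 Frontend Framework",
--             "Angular": "🎨 Frontend Framework",
--             "jQuery": "🎨 Frontend Framework",
--             "Bootstrap": "🎨 Frontend Framework",
--             "Tailwind CSS": "🎨 Frontend Framework",
--             "Next.js": "🎨 Frontend Framework",
--             "Nuxt.js": "🎨 Frontend Framework",
--             "Foundation": "🎨 Frontend Framework",
--             "Bulma": "🎨 Frontend Framework",
--
--             "WordPress": "📱 CMS/Platform",
--             "Drupal": "📱 CMS/Platform",
--             "Joomla": "📱 CMS/Platform",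
--             "Ghost": "📱 CMS/Platform",
--             "Shopify": "📱 CMS/Platform",
--             "Wix": "📱 CMS/Platform",
--             "Squarespace": "📱 CMS/Platform",
--             "Webflow": "📱 CMS/Platform",
--             "Magento": "📱 CMS/Platform",
--
--             "Cloudflare CDN": "🛡️ CDN/WAF",
--             "Cloudflare": "🛡️ CDN/WAF",
--             "Akamai CDN": "🛡️ CDN/WAF",
--             "Akamai": "🛡️ CDN/WAF",
--             "Fastly CDN": "🛡️ CDN/WAF",
--             "Fastly": "🛡️ CDN/WAF",
--             "CloudFront": "🛡️ CDN/WAF",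
--
--             "Google Analytics / GTM": "📊 Analytics/Tracking",
--             "Matomo": "📊 Analytics/Tracking",
--             "Hotjar": "📊 Analytics/Tracking",
--             "HubSpot": "📊 Analytics/Tracking",
--             "Facebook Pixel": "📊 Analytics/Tracking",
--             "Google Ads": "📊 Analytics/Tracking",
--
--             "Vercel": "🔧 Development Tools",
--             "Netlify": "🔧 Development Tools",
--             "Heroku": "🔧 Development Tools",
--             "Azure App Service": "🔧 Development Tools",
--         }
--
--         for tech in techs:
--             category = tech_mapping.get(tech, "📦 Other Technologies")
--             categories[category].append(tech)
--
--         output_lines.append(f"[bold cyan]{host}[/bold cyan]")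
--
--         for category, tech_list in categories.items():
--             if tech_list:
--                 tech_list = sorted(set(tech_list))
--                 tech_string = ", ".join(tech_list)
--                 output_lines.append(f"  {category}: [white]{tech_string}[/white]")
--
--         output_lines.append("")
--
--     return "\n".join(output_lines)
-- ===== SOURCE B (Python) =====
-- # B: inverse representation — ordered (category, member-set) list; per host intersect the
-- # tech set with each category and take the complement for "Other" (objective: alternative).
--
-- _CATEGORIES = [
--     ("🌐 Web Server", frozenset({"Nginx", "Apache", "LiteSpeed", "Gunicorn", "uWSGI", "Tomcat"})),
--     ("⚙️ Backend Framework", frozenset({"PHP", "ASP.NET", "Express", "Laravel", "Node.js"})),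
--     ("🎨 Frontend Framework", frozenset({"React", "Vue.js", "Angular", "jQuery", "Bootstrap",
--                                          "Tailwind CSS", "Next.js", "Nuxt.js", "Foundation", "Bulma"})),
--     ("📱 CMS/Platform", frozenset({"WordPress", "Drupal", "Joomla", "Ghost", "Shopify", "Wix",
--                                    "Squarespace", "Webflow", "Magento"})),
--     ("🛡️ CDN/WAF", frozenset({"Cloudflare CDN", "Cloudflare", "Akamai CDN", "Akamai",
--                                "Fastly CDN", "Fastly", "CloudFront"})),
--     ("📊 Analytics/Tracking", frozenset({"Google Analytics / GTM", "Matomo", "Hotjar", "HubSpot",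
--                                          "Facebook Pixel", "Google Ads"})),
--     ("🔧 Development Tools", frozenset({"Vercel", "Netlify", "Heroku", "Azure App Service"})),
-- ]
-- _KNOWN = frozenset().union(*(members for _, members in _CATEGORIES))
--
--
-- def format_tech_output(tech_results):
--     """Format technology detection results in a structured way"""
--     if not tech_results:
--         return "[yellow]No technologies detected[/yellow]"
--
--     lines = []
--     for host, techs in sorted(tech_results.items(), key=lambda kv: kv[0]):
--         if not techs:
--             lines.append(f"[dim]{host} → No technologies detected[/dim]")
--             continue
--         lines.append(f"[bold cyan]{host}[/bold cyan]")
--         tset = set(techs)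
--         for label, members in _CATEGORIES:
--             sel = sorted(tset & members)
--             if sel:
--                 lines.append(f"  {label}: [white]{', '.join(sel)}[/white]")
--         other = sorted(tset - _KNOWN)
--         if other:
--             lines.append(f"  📦 Other Technologies: [white]{', '.join(other)}[/white]")
--         lines.append("")
--     return "\n".join(lines)
-- ===== Notes on version B (the rewrite author's own statement) =====
-- stated objective: alternative
-- what changed: Replaced the forward tech->category dict and per-host bucket-dict building with the inverse representation: a fixed ordered list of (category, member-set); per host B builds one tech set and emits each category as sorted(set & members) and Other as sorted(set - known), instead of appending into 8 mutable buckets and deduplicating each afterwards.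
import Mathlib
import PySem

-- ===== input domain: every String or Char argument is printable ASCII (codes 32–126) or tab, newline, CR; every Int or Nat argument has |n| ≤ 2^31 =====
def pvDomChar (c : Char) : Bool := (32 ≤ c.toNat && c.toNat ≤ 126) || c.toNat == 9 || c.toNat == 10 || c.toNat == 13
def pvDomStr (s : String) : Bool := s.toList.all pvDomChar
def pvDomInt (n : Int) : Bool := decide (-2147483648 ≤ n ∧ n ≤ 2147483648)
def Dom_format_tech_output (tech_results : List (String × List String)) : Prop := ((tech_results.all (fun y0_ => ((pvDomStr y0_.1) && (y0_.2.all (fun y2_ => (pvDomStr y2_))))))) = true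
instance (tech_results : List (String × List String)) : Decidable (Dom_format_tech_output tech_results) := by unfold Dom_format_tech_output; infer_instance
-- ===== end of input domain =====

-- B replaces A's forward tech→category dict and mutable per-host buckets by a fixed ordered
-- list of (category, member-set): per host one tech set, each category line is
-- sorted(set ∩ members) and "Other" is sorted(set \ known). Equivalence of the RETURN value
-- is proved on the whole domain. (The argument is a Python dict, so its keys are distinct;
-- 'sorted(tech_results.items())' is ported as a stable sort by key, identical on dicts.)

-- ===== PORT A =====
def pvOther : String := "📦 Other Technologies"

def pvMapping : PySem.Dict String String := PySem.Dict.mk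
  [("Nginx", "🌐 Web Server"), ("Apache", "🌐 Web Server"), ("LiteSpeed", "🌐 Web Server"),
   ("Gunicorn", "🌐 Web Server"), ("uWSGI", "🌐 Web Server"), ("Tomcat", "🌐 Web Server"),
   ("PHP", "⚙️ Backend Framework"), ("ASP.NET", "⚙️ Backend Framework"), ("Express", "⚙️ Backend Framework"),
   ("Laravel", "⚙️ Backend Framework"), ("Node.js", "⚙️ Backend Framework"),
   ("React", "🎨 Frontend Framework"), ("Vue.js", "🎨 Frontend Framework"), ("Angular", "🎨 Frontend Framework"),
   ("jQuery", "🎨 Frontend Framework"), ("Bootstrap", "🎨 Frontend Framework"), ("Tailwind CSS", "🎨 Frontend Framework"),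
   ("Next.js", "🎨 Frontend Framework"), ("Nuxt.js", "🎨 Frontend Framework"), ("Foundation", "🎨 Frontend Framework"),
   ("Bulma", "🎨 Frontend Framework"),
   ("WordPress", "📱 CMS/Platform"), ("Drupal", "📱 CMS/Platform"), ("Joomla", "📱 CMS/Platform"),
   ("Ghost", "📱 CMS/Platform"), ("Shopify", "📱 CMS/Platform"), ("Wix", "📱 CMS/Platform"),
   ("Squarespace", "📱 CMS/Platform"), ("Webflow", "📱 CMS/Platform"), ("Magento", "📱 CMS/Platform"),
   ("Cloudflare CDN", "🛡️ CDN/WAF"), ("Cloudflare", "🛡️ CDN/WAF"), ("Akamai CDN", "🛡️ CDN/WAF"),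
   ("Akamai", "🛡️ CDN/WAF"), ("Fastly CDN", "🛡️ CDN/WAF"), ("Fastly", "🛡️ CDN/WAF"),
   ("CloudFront", "🛡️ CDN/WAF"),
   ("Google Analytics / GTM", "📊 Analytics/Tracking"), ("Matomo", "📊 Analytics/Tracking"),
   ("Hotjar", "📊 Analytics/Tracking"), ("HubSpot", "📊 Analytics/Tracking"),
   ("Facebook Pixel", "📊 Analytics/Tracking"), ("Google Ads", "📊 Analytics/Tracking"),
   ("Vercel", "🔧 Development Tools"), ("Netlify", "🔧 Development Tools"),
   ("Heroku", "🔧 Development Tools"), ("Azure App Service", "🔧 Development Tools")]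

def pvCats0 : PySem.Dict String (List String) := PySem.Dict.mk
  [("🌐 Web Server", []), ("⚙️ Backend Framework", []), ("🎨 Frontend Framework", []),
   ("📱 CMS/Platform", []), ("🛡️ CDN/WAF", []), ("📊 Analytics/Tracking", []),
   ("🔧 Development Tools", []), ("📦 Other Technologies", [])]

-- tech_mapping.get(tech, "📦 Other Technologies")
def pvCatFor (t : String) : String := pvMapping.getD t pvOther

def pvHostLinesA (acc : List String) (host : String) (techs : List String) : List String :=
  if techs = [] then
    acc ++ ["[dim]" ++ host ++ " → No technologies detected[/dim]"]
  else
    let cats := techs.foldl (fun d t => d.modify (pvCatFor t) [] (fun l => l ++ [t])) pvCats0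
    let acc := acc ++ ["[bold cyan]" ++ host ++ "[/bold cyan]"]
    let acc := cats.items.foldl (fun acc p =>
      if p.2 ≠ [] then
        acc ++ ["  " ++ p.1 ++ ": [white]" ++
                PySem.Str.join ", " (PySem.List.sorted (PySem.Set.ofList p.2) (fun x => x) false) ++ "[/white]"]
      else acc) acc
    acc ++ [""]

def format_tech_output (tech_results : List (String × List String)) : String :=
  if tech_results = [] then "[yellow]No technologies detected[/yellow]"
  else
    PySem.Str.join "\n"
      ((PySem.List.sorted tech_results (fun p => p.1) false).foldl
        (fun acc p => pvHostLinesA acc p.1 p.2) [])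

-- ===== PORT B =====
def pvCategories : List (String × PySem.Set String) :=
  [("🌐 Web Server", PySem.Set.ofList ["Nginx", "Apache", "LiteSpeed", "Gunicorn", "uWSGI", "Tomcat"]),
   ("⚙️ Backend Framework", PySem.Set.ofList ["PHP", "ASP.NET", "Express", "Laravel", "Node.js"]),
   ("🎨 Frontend Framework", PySem.Set.ofList ["React", "Vue.js", "Angular", "jQuery", "Bootstrap",
      "Tailwind CSS", "Next.js", "Nuxt.js", "Foundation", "Bulma"]),
   ("📱 CMS/Platform", PySem.Set.ofList ["WordPress", "Drupal", "Joomla", "Ghost", "Shopify", "Wix",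
      "Squarespace", "Webflow", "Magento"]),
   ("🛡️ CDN/WAF", PySem.Set.ofList ["Cloudflare CDN", "Cloudflare", "Akamai CDN", "Akamai",
      "Fastly CDN", "Fastly", "CloudFront"]),
   ("📊 Analytics/Tracking", PySem.Set.ofList ["Google Analytics / GTM", "Matomo", "Hotjar", "HubSpot",
      "Facebook Pixel", "Google Ads"]),
   ("🔧 Development Tools", PySem.Set.ofList ["Vercel", "Netlify", "Heroku", "Azure App Service"])]

def pvKnown : PySem.Set String :=
  pvCategories.foldl (fun s p => PySem.Set.union s p.2) PySem.Set.empty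

def pvHostLinesB (acc : List String) (host : String) (techs : List String) : List String :=
  if techs = [] then
    acc ++ ["[dim]" ++ host ++ " → No technologies detected[/dim]"]
  else
    let acc := acc ++ ["[bold cyan]" ++ host ++ "[/bold cyan]"]
    let tset := PySem.Set.ofList techs
    let acc := pvCategories.foldl (fun acc p =>
      let sel := PySem.List.sorted (PySem.Set.inter tset p.2) (fun x => x) false
      if sel ≠ [] then
        acc ++ ["  " ++ p.1 ++ ": [white]" ++ PySem.Str.join ", " sel ++ "[/white]"]
      else acc) acc
    let other := PySem.List.sorted (PySem.Set.diff tset pvKnown) (fun x => x) false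
    let acc := if other ≠ [] then
        acc ++ ["  📦 Other Technologies: [white]" ++ PySem.Str.join ", " other ++ "[/white]"]
      else acc
    acc ++ [""]

def format_tech_output_alt (tech_results : List (String × List String)) : String :=
  if tech_results = [] then "[yellow]No technologies detected[/yellow]"
  else
    PySem.Str.join "\n"
      ((PySem.List.sorted tech_results (fun p => p.1) false).foldl
        (fun acc p => pvHostLinesB acc p.1 p.2) [])

-- ===== PRECONDITION & SPEC =====
def Spec_format_tech_output (tech_results : List (String × List String)) (out : String) : Prop := out = format_tech_output_alt tech_results
instance (tech_results : List (String × List String)) (out : String) : Decidable (Spec_format_tech_output tech_results out) := by unfold Spec_format_tech_output; infer_instance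

-- ===== CLAIM (what is proved, stated in full; the proofs are below) =====
def Claim_equal_format_tech_output : Prop := ∀ (tech_results : List (String × List String)), Dom_format_tech_output tech_results → Spec_format_tech_output tech_results (format_tech_output tech_results)

-- ===== LEMMAS AND PROOFS =====

-- ===== LEMMAS AND PROOFS =====

theorem getD_mk_eq_iff (l : List (String × String)) (t c d : String)
    (hnd : (l.map (·.1)).Nodup) (hdc : d ≠ c) :
    (PySem.Dict.mk l).getD t d = c ↔ t ∈ (l.filter (fun p => p.2 == c)).map (·.1) := by
  induction l with
  | nil => simp [PySem.Dict.getD_eq_get?_getD, PySem.Dict.get?, hdc]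
  | cons p rest ih =>
    simp only [List.map_cons, List.nodup_cons] at hnd
    rw [PySem.Dict.getD_eq_get?_getD, PySem.Dict.get?_mk_cons]
    by_cases h : p.1 = t
    · subst h
      simp only [beq_self_eq_true, if_pos, Option.getD_some]
      constructor
      · intro hv
        simp [hv]
      · intro hmem
        rcases List.mem_map.1 hmem with ⟨q, hq, hq1⟩
        rcases List.mem_filter.1 hq with ⟨hqmem, hqv⟩
        rcases List.mem_cons.1 hqmem with rfl | hqr
        · exact beq_iff_eq.1 hqv
        · exact absurd (hq1 ▸ List.mem_map_of_mem hqr) hnd.1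
    · have hb : (p.1 == t) = false := beq_eq_false_iff_ne.2 h
      rw [hb, if_neg (by simp)]
      rw [← PySem.Dict.getD_eq_get?_getD, ih hnd.2]
      simp only [List.filter_cons]
      by_cases hv : (p.2 == c) = true
      · simp [hv, Ne.symm h]
      · simp [hv]

theorem getD_mk_eq_default_iff (l : List (String × String)) (t d : String)
    (hd : ∀ p ∈ l, p.2 ≠ d) :
    (PySem.Dict.mk l).getD t d = d ↔ t ∉ l.map (·.1) := by
  induction l with
  | nil => simp [PySem.Dict.getD_eq_get?_getD, PySem.Dict.get?]
  | cons p rest ih =>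
    rw [PySem.Dict.getD_eq_get?_getD, PySem.Dict.get?_mk_cons]
    by_cases h : p.1 = t
    · subst h
      simp only [beq_self_eq_true, if_pos, Option.getD_some, List.map_cons]
      simp [hd p (List.mem_cons_self)]
    · have hb : (p.1 == t) = false := beq_eq_false_iff_ne.2 h
      rw [hb, if_neg (by simp)]
      rw [← PySem.Dict.getD_eq_get?_getD, ih (fun q hq => hd q (List.mem_cons_of_mem _ hq))]
      constructor
      · intro hr
        simp only [List.map_cons, List.mem_cons, not_or]
        exact ⟨fun he => h he.symm, hr⟩
      · intro hr
        simp only [List.map_cons, List.mem_cons, not_or] at hr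
        exact hr.2

theorem getD_mk_mem (l : List (String × String)) (t d : String) :
    (PySem.Dict.mk l).getD t d = d ∨ (PySem.Dict.mk l).getD t d ∈ l.map (·.2) := by
  induction l with
  | nil => left; simp [PySem.Dict.getD_eq_get?_getD, PySem.Dict.get?]
  | cons p rest ih =>
    rw [PySem.Dict.getD_eq_get?_getD, PySem.Dict.get?_mk_cons]
    by_cases h : (p.1 == t) = true
    · right; simp [h]
    · rw [if_neg h, ← PySem.Dict.getD_eq_get?_getD]
      rcases ih with h1 | h1
      · left; exact h1
      · right; simp [List.mem_cons]; right; simpa using h1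

def pvCat8 : List String :=
  ["🌐 Web Server", "⚙️ Backend Framework", "🎨 Frontend Framework", "📱 CMS/Platform",
   "🛡️ CDN/WAF", "📊 Analytics/Tracking", "🔧 Development Tools", "📦 Other Technologies"]

set_option maxRecDepth 100000 in
theorem mapping_keys_nodup : ((pvMapping.items).map (·.1)).Nodup := by decide

set_option maxRecDepth 100000 in
theorem classify_cat (c : String) (m : List String) (hdc : pvOther ≠ c)
    (hm : (pvMapping.items.filter (fun p => p.2 == c)).map (·.1) = m) (t : String) :
    pvCatFor t = c ↔ t ∈ m := by
  rw [← hm]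
  unfold pvCatFor pvMapping
  exact getD_mk_eq_iff _ t c pvOther (by exact mapping_keys_nodup) hdc

set_option maxRecDepth 100000 in
theorem classify_other (t : String) : pvCatFor t = pvOther ↔ t ∉ pvKnown := by
  have hK : pvKnown = pvMapping.items.map (·.1) := by decide
  rw [hK]
  unfold pvCatFor pvMapping
  exact getD_mk_eq_default_iff _ t pvOther (by decide)

set_option maxRecDepth 100000 in
theorem catFor_mem (t : String) : pvCatFor t ∈ pvCat8 := by
  have hv : ∀ v ∈ pvMapping.items.map (·.2), v ∈ pvCat8 := by decide
  rcases getD_mk_mem pvMapping.items t pvOther with h | h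
  · unfold pvCatFor; rw [show pvMapping.getD t pvOther = (PySem.Dict.mk pvMapping.items).getD t pvOther from rfl, h]; decide
  · exact hv _ (by unfold pvCatFor; rw [show pvMapping.getD t pvOther = (PySem.Dict.mk pvMapping.items).getD t pvOther from rfl]; exact h)

-- two Nodup lists with the same members have the same Python sorted()
theorem sorted_eq_of_nodup_iff (xs ys : List String) (hx : xs.Nodup) (hy : ys.Nodup)
    (h : ∀ a, a ∈ xs ↔ a ∈ ys) :
    PySem.List.sorted xs (fun x => x) false = PySem.List.sorted ys (fun x => x) false := by
  have hperm : (PySem.List.sorted ys (fun x => x) false).Perm ys := PySem.List.sorted_perm ys _ false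
  have hpx : (PySem.List.sorted ys (fun x => x) false).Perm xs :=
    hperm.trans ((List.perm_ext_iff_of_nodup hy hx).2 (fun a => (h a).symm))
  have hnd : (PySem.List.sorted ys (fun x => x) false).Nodup := hperm.symm.nodup hy
  have hle : (PySem.List.sorted ys (fun x => x) false).Pairwise (fun a b => a ≤ b) :=
    PySem.List.sorted_pairwise ys (fun x => x) 
  have hlt : (PySem.List.sorted ys (fun x => x) false).Pairwise (fun a b : String => a < b) :=
    (hle.and hnd).imp (fun hab => lt_of_le_of_ne hab.1 hab.2)
  exact PySem.List.sorted_eq_of_perm_of_pairwise_lt xs _ _ hpx hlt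

theorem sorted_nil_iff (xs : List String) :
    PySem.List.sorted xs (fun x => x) false = [] ↔ xs = [] := by
  constructor
  · intro h
    have := PySem.List.sorted_perm xs (fun x : String => x) false
    rw [h] at this
    exact this.symm.eq_nil
  · intro h; subst h; rfl

theorem cats0_keys : pvCats0.keys = pvCat8 := by decide

theorem bucket_getD (ts : List String) (c : String) (hc : pvCats0.getD c [] = []) :
    ((ts.foldl (fun d t => d.modify (pvCatFor t) [] (fun l => l ++ [t])) pvCats0)).getD c []
      = ts.filter (fun t => pvCatFor t == c) := by
  have h1 : ts.foldl (fun d t => d.modify (pvCatFor t) [] (fun l => l ++ [t])) pvCats0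
      = (ts.map (fun t => (pvCatFor t, t))).foldl (fun d p => d.modify p.1 [] (fun l => l ++ [p.2])) pvCats0 := by
    rw [List.foldl_map]
  rw [h1, PySem.Dict.getD_foldl_modify_append, hc]
  simp [List.filter_map, Function.comp_def, List.map_map]

set_option maxRecDepth 100000 in
theorem catsA_items (ts : List String) :
    ((ts.foldl (fun d t => d.modify (pvCatFor t) [] (fun l => l ++ [t])) pvCats0)).items
      = pvCat8.map (fun c => (c, ts.filter (fun t => pvCatFor t == c))) := by
  have hkeys : ((ts.foldl (fun d t => d.modify (pvCatFor t) [] (fun l => l ++ [t])) pvCats0)).keys = pvCat8 := by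
    rw [PySem.Dict.keys_foldl_modify_key, PySem.Set.update_eq_append_filter, cats0_keys]
    have : (PySem.Set.ofList (ts.map pvCatFor)).filter (fun y => !(PySem.Set.contains pvCat8 y)) = [] := by
      rw [List.filter_eq_nil_iff]
      intro y hy
      have hyc : y ∈ pvCat8 := by
        have hy' : y ∈ ts.map pvCatFor := (PySem.Set.mem_ofList _ _).1 hy
        rcases List.mem_map.1 hy' with ⟨t, _, rfl⟩
        exact catFor_mem t
      simp at hyc ⊢
      simpa using hyc
    rw [this, List.append_nil]
  have hnd : ((ts.foldl (fun d t => d.modify (pvCatFor t) [] (fun l => l ++ [t])) pvCats0)).keys.Nodup := by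
    rw [hkeys]; decide
  rw [PySem.Dict.items_eq_map_keys _ hnd [], hkeys]
  apply List.map_congr_left
  intro c hc
  have hall : ∀ c' ∈ pvCat8, pvCats0.getD c' [] = [] := by decide
  have hc0 : pvCats0.getD c [] = [] := hall c hc
  rw [bucket_getD ts c hc0]

theorem ofList_nil_iff (xs : List String) : PySem.Set.ofList xs = [] ↔ xs = [] := by
  constructor
  · intro h
    rw [List.eq_nil_iff_forall_not_mem]
    intro a ha
    have : a ∈ PySem.Set.ofList xs := (PySem.Set.mem_ofList _ _).2 ha
    rw [h] at this
    exact absurd this (List.not_mem_nil)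
  · intro h; subst h; rfl

theorem catline_eq (ts : List String) (c : String) (m : List String)
    (hdc : pvOther ≠ c) (hm : (pvMapping.items.filter (fun p => p.2 == c)).map (·.1) = m)
    (acc : List String) :
    (if ts.filter (fun t => pvCatFor t == c) ≠ [] then
       acc ++ ["  " ++ c ++ ": [white]" ++
         PySem.Str.join ", " (PySem.List.sorted (PySem.Set.ofList (ts.filter (fun t => pvCatFor t == c))) (fun x => x) false) ++ "[/white]"]
     else acc)
    = (if PySem.List.sorted (PySem.Set.inter (PySem.Set.ofList ts) m) (fun x => x) false ≠ [] then
       acc ++ ["  " ++ c ++ ": [white]" ++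
         PySem.Str.join ", " (PySem.List.sorted (PySem.Set.inter (PySem.Set.ofList ts) m) (fun x => x) false) ++ "[/white]"]
     else acc) := by
  have hsort : PySem.List.sorted (PySem.Set.ofList (ts.filter (fun t => pvCatFor t == c))) (fun x => x) false
      = PySem.List.sorted (PySem.Set.inter (PySem.Set.ofList ts) m) (fun x => x) false := by
    apply sorted_eq_of_nodup_iff _ _ (PySem.Set.nodup_ofList _) (PySem.Set.nodup_inter _ _ (PySem.Set.nodup_ofList _))
    intro a
    simp only [PySem.Set.mem_ofList, PySem.Set.mem_inter, List.mem_filter, beq_iff_eq,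
      classify_cat c m hdc hm a]
  have hcond : (ts.filter (fun t => pvCatFor t == c) = [])
      ↔ (PySem.List.sorted (PySem.Set.inter (PySem.Set.ofList ts) m) (fun x => x) false = []) := by
    rw [← hsort, sorted_nil_iff, ofList_nil_iff]
  by_cases h : ts.filter (fun t => pvCatFor t == c) = []
  · rw [if_neg (fun hn => hn h), if_neg (fun hn => hn (hcond.1 h))]
  · rw [if_pos h, if_pos (fun he => h (hcond.2 he)), hsort]

theorem otherline_eq (ts : List String) (acc : List String) :
    (if ts.filter (fun t => pvCatFor t == pvOther) ≠ [] then
       acc ++ ["  " ++ pvOther ++ ": [white]" ++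
         PySem.Str.join ", " (PySem.List.sorted (PySem.Set.ofList (ts.filter (fun t => pvCatFor t == pvOther))) (fun x => x) false) ++ "[/white]"]
     else acc)
    = (if PySem.List.sorted (PySem.Set.diff (PySem.Set.ofList ts) pvKnown) (fun x => x) false ≠ [] then
       acc ++ ["  📦 Other Technologies: [white]" ++
         PySem.Str.join ", " (PySem.List.sorted (PySem.Set.diff (PySem.Set.ofList ts) pvKnown) (fun x => x) false) ++ "[/white]"]
     else acc) := by
  have hlabel : ("  " ++ pvOther ++ ": [white]" : String) = "  📦 Other Technologies: [white]" := rfl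
  have hsort : PySem.List.sorted (PySem.Set.ofList (ts.filter (fun t => pvCatFor t == pvOther))) (fun x => x) false
      = PySem.List.sorted (PySem.Set.diff (PySem.Set.ofList ts) pvKnown) (fun x => x) false := by
    apply sorted_eq_of_nodup_iff _ _ (PySem.Set.nodup_ofList _) (PySem.Set.nodup_diff _ _ (PySem.Set.nodup_ofList _))
    intro a
    simp only [PySem.Set.mem_ofList, PySem.Set.mem_diff, List.mem_filter, beq_iff_eq,
      classify_other a]
  have hcond : (ts.filter (fun t => pvCatFor t == pvOther) = [])
      ↔ (PySem.List.sorted (PySem.Set.diff (PySem.Set.ofList ts) pvKnown) (fun x => x) false = []) := by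
    rw [← hsort, sorted_nil_iff, ofList_nil_iff]
  by_cases h : ts.filter (fun t => pvCatFor t == pvOther) = []
  · rw [if_neg (fun hn => hn h), if_neg (fun hn => hn (hcond.1 h))]
  · rw [if_pos h, if_pos (fun he => h (hcond.2 he)), hsort, hlabel]

set_option maxRecDepth 100000 in
set_option maxHeartbeats 1000000 in
theorem hostLines_eq : pvHostLinesA = pvHostLinesB := by
  funext acc host ts
  unfold pvHostLinesA pvHostLinesB
  by_cases hts : ts = []
  · simp only [if_pos hts]
  · simp only [if_neg hts]
    rw [catsA_items]
    simp only [pvCat8, pvCategories, List.map_cons, List.map_nil, List.foldl_cons, List.foldl_nil]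
    rw [catline_eq ts "🌐 Web Server" ["Nginx", "Apache", "LiteSpeed", "Gunicorn", "uWSGI", "Tomcat"] (by decide) (by decide)]
    rw [catline_eq ts "⚙️ Backend Framework" ["PHP", "ASP.NET", "Express", "Laravel", "Node.js"] (by decide) (by decide)]
    rw [catline_eq ts "🎨 Frontend Framework" ["React", "Vue.js", "Angular", "jQuery", "Bootstrap", "Tailwind CSS", "Next.js", "Nuxt.js", "Foundation", "Bulma"] (by decide) (by decide)]
    rw [catline_eq ts "📱 CMS/Platform" ["WordPress", "Drupal", "Joomla", "Ghost", "Shopify", "Wix", "Squarespace", "Webflow", "Magento"] (by decide) (by decide)]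
    rw [catline_eq ts "🛡️ CDN/WAF" ["Cloudflare CDN", "Cloudflare", "Akamai CDN", "Akamai", "Fastly CDN", "Fastly", "CloudFront"] (by decide) (by decide)]
    rw [catline_eq ts "📊 Analytics/Tracking" ["Google Analytics / GTM", "Matomo", "Hotjar", "HubSpot", "Facebook Pixel", "Google Ads"] (by decide) (by decide)]
    rw [catline_eq ts "🔧 Development Tools" ["Vercel", "Netlify", "Heroku", "Azure App Service"] (by decide) (by decide)]
    rw [show ("📦 Other Technologies" : String) = pvOther from rfl]
    rw [otherline_eq ts]
    rfl

-- ===== VERDICT (by name: the statement is the Claim_ definition above) =====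
theorem format_tech_output_spec : Claim_equal_format_tech_output := by
  intro tr _
  unfold Spec_format_tech_output format_tech_output format_tech_output_alt
  rw [hostLines_eq]
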